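-- pv_equiv track=rewrite | github.com/adriandalion/CMSC-162-Project-1 | CMSC162_Guide4_Dalion_Mazo.py | compute_grayscale_rows_and_hist
-- ===== SOURCE A (Python) =====
-- from typing import List, Tuple, Optional
--
-- def compute_grayscale_rows_and_hist(rgb_rows: List[List[Tuple[int,int,int]]]):
--     gray_rows = []; ghist = [0]*256
--     for row in rgb_rows:
--         prow = []
--         for (r,g,b) in row:
--             s = (r + g + b) // 3
--             prow.append((s,s,s))
--             ghist[s] += 1
--         gray_rows.append(prow)
--     return gray_rows, ghist
-- ===== SOURCE B (Python) =====
-- def compute_grayscale_rows_and_hist(rgb_rows):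
--     # Build all gray rows first; then count distinct gray values into a sparse
--     # dict counter; finally scatter the counter into the dense 256-bin list.
--     gray_rows = [[((r + g + b) // 3,) * 3 for (r, g, b) in row] for row in rgb_rows]
--     cnt = {}
--     for row in gray_rows:
--         for p in row:
--             cnt[p[0]] = cnt.get(p[0], 0) + 1
--     ghist = [0] * 256
--     for s, c in cnt.items():
--         ghist[s] += c
--     return gray_rows, ghist
-- ===== Notes on version B (the rewrite author's own statement) =====
-- stated objective: alternative
-- what changed: A fuses row construction and per-pixel histogram increments in one nested loop; B builds all gray rows first, then counts gray values into a sparse dict counter, and finally scatters that counter's (value, count) items into the dense 256-bin list.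
import Mathlib
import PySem

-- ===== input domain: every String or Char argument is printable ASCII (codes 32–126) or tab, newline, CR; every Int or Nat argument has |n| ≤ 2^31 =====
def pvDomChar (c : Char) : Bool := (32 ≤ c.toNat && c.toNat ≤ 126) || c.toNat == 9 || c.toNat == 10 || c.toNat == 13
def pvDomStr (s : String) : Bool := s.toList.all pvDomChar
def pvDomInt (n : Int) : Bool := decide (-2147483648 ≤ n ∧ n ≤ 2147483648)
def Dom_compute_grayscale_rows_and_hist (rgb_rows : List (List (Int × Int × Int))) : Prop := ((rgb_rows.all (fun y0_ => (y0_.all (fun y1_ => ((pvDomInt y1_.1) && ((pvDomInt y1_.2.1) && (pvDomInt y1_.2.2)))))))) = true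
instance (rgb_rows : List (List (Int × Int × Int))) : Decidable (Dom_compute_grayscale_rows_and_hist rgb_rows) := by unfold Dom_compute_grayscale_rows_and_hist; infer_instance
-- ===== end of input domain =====

-- B builds the gray rows first, then a sparse dict counter of gray values, then scatters
-- the counter into the 256-bin list; objective: alternative (same cost, different structure).

-- shared primitive: Python's `hist[s] += 1` on a list (negative index counts from the end);
-- exact for indices in range after Python's wrap, which Pre_ guarantees
def pyIncr (h : List Int) (i : Int) : List Int :=
  let j := if i < 0 then i + (h.length : Int) else i
  h.modify j.toNat (· + 1)

-- ===== PORT A =====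
def compute_grayscale_rows_and_hist (rgb_rows : List (List (Int × Int × Int))) : (List (List (Int × Int × Int))) × List Int :=
  rgb_rows.foldl
    (fun (st : List (List (Int × Int × Int)) × List Int) row =>
      let pr := row.foldl
        (fun (st2 : List (Int × Int × Int) × List Int) p =>
          let s := PySem.Int.floordiv (p.1 + p.2.1 + p.2.2) 3
          (st2.1 ++ [(s, s, s)], pyIncr st2.2 s))
        (([] : List (Int × Int × Int)), st.2)
      (st.1 ++ [pr.1], pr.2))
    (([] : List (List (Int × Int × Int))), List.replicate 256 (0 : Int))

-- ===== PORT B =====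
-- Python's `hist[s] += c` (negative index wraps), exact in range as for pyIncr
def pyIncrBy (h : List Int) (i c : Int) : List Int :=
  let j := if i < 0 then i + (h.length : Int) else i
  h.modify j.toNat (· + c)

def grayRowB (row : List (Int × Int × Int)) : List (Int × Int × Int) :=
  row.map (fun p =>
    let s := PySem.Int.floordiv (p.1 + p.2.1 + p.2.2) 3
    (s, s, s))

def compute_grayscale_rows_and_hist_alt (rgb_rows : List (List (Int × Int × Int))) : (List (List (Int × Int × Int))) × List Int :=
  let gray_rows := rgb_rows.map grayRowB
  -- cnt[p[0]] = cnt.get(p[0], 0) + 1 over all pixels of gray_rows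
  let cnt := (gray_rows.flatMap (fun row => row.map (·.1))).foldl
    (fun (d : PySem.Dict Int Int) s => d.insert s (d.getD s 0 + 1)) PySem.Dict.empty
  -- for s, c in cnt.items(): ghist[s] += c
  let ghist := cnt.items.foldl (fun h p => pyIncrBy h p.1 p.2) (List.replicate 256 (0 : Int))
  (gray_rows, ghist)

-- ===== PRECONDITION & SPEC =====
-- Pre_ excludes exactly the inputs on which Python A raises IndexError: a pixel whose gray
-- value (r+g+b)//3 falls outside [-256, 255] (Python's negative indexing accepts -256..-1).
def Pre_compute_grayscale_rows_and_hist (rgb_rows : List (List (Int × Int × Int))) : Prop :=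
  ∀ row ∈ rgb_rows, ∀ p ∈ row,
    -256 ≤ PySem.Int.floordiv (p.1 + p.2.1 + p.2.2) 3 ∧
    PySem.Int.floordiv (p.1 + p.2.1 + p.2.2) 3 ≤ 255
instance (rgb_rows : List (List (Int × Int × Int))) : Decidable (Pre_compute_grayscale_rows_and_hist rgb_rows) := by unfold Pre_compute_grayscale_rows_and_hist; infer_instance

def pvWitness_compute_grayscale_rows_and_hist : (List (List (Int × Int × Int))) :=
  [[(10, 20, 30), (255, 255, 255)], [(0, 0, 0)]]

def Spec_compute_grayscale_rows_and_hist (rgb_rows : List (List (Int × Int × Int))) (out : (List (List (Int × Int × Int))) × List Int) : Prop := out = compute_grayscale_rows_and_hist_alt rgb_rows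
instance (rgb_rows : List (List (Int × Int × Int))) (out : (List (List (Int × Int × Int))) × List Int) : Decidable (Spec_compute_grayscale_rows_and_hist rgb_rows out) := by unfold Spec_compute_grayscale_rows_and_hist; infer_instance

-- ===== CLAIM =====
def Claim_equal_compute_grayscale_rows_and_hist : Prop := ∀ (rgb_rows : List (List (Int × Int × Int))), Dom_compute_grayscale_rows_and_hist rgb_rows → Pre_compute_grayscale_rows_and_hist rgb_rows → Spec_compute_grayscale_rows_and_hist rgb_rows (compute_grayscale_rows_and_hist rgb_rows)

-- ===== LEMMAS AND PROOFS =====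

-- increments at (possibly different) indices commute
lemma incr_comm (h : List Int) (s t c : Int) :
    pyIncr (pyIncrBy h t c) s = pyIncrBy (pyIncr h s) t c := by
  unfold pyIncr pyIncrBy
  simp only [List.length_modify]
  apply List.ext_getElem
  · simp
  · intro j hj hj'
    simp only [List.getElem_modify]
    split_ifs <;> omega

-- bumping the stored count by one = one extra pyIncr
lemma incrBy_succ (h : List Int) (s c : Int) :
    pyIncrBy h s (c + 1) = pyIncr (pyIncrBy h s c) s := by
  unfold pyIncr pyIncrBy
  simp only [List.length_modify]
  apply List.ext_getElem
  · simp
  · intro j hj hj'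
    simp only [List.getElem_modify]
    split_ifs <;> omega

lemma fold_incr_comm (s : Int) :
    ∀ (its : List (Int × Int)) (h : List Int),
      its.foldl (fun h p => pyIncrBy h p.1 p.2) (pyIncr h s)
        = pyIncr (its.foldl (fun h p => pyIncrBy h p.1 p.2) h) s := by
  intro its
  induction its with
  | nil => intro h; rfl
  | cons p t ih => intro h; simp only [List.foldl_cons, ← incr_comm, ih]

-- scattering items with the s-entry bumped = scattering items, then one pyIncr at s
lemma bump_fold (s : Int) :
    ∀ (its : List (Int × Int)) (h : List Int),
      s ∈ its.map (·.1) → (its.map (·.1)).Nodup →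
      (its.map (fun p => if p.1 == s then (s, p.2 + 1) else p)).foldl
          (fun h p => pyIncrBy h p.1 p.2) h
        = pyIncr (its.foldl (fun h p => pyIncrBy h p.1 p.2) h) s := by
  intro its
  induction its with
  | nil => intro h hm _; simp at hm
  | cons q rest ih =>
      intro h hm hnd
      simp only [List.map_cons, List.nodup_cons] at hnd
      by_cases hq : q.1 = s
      · have hrest : rest.map (fun p => if p.1 == s then (s, p.2 + 1) else p) = rest := by
          apply List.map_congr_left ?_ |>.trans (List.map_id rest)
          intro p hp
          have hne : p.1 ≠ s := by
            intro hps
            apply hnd.1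
            rw [hq, ← hps]
            exact List.mem_map_of_mem hp
          simp [hne]
        simp only [List.map_cons, hq, BEq.rfl, if_pos, List.foldl_cons, hrest]
        rw [incrBy_succ, fold_incr_comm]
      · have hm' : s ∈ rest.map (·.1) := by
          rcases List.mem_map.mp hm with ⟨p, hp, hps⟩
          rcases List.mem_cons.mp hp with h1 | h2
          · exact absurd (h1 ▸ hps) hq
          · exact List.mem_map.mpr ⟨p, h2, hps⟩
        have : (q.1 == s) = false := by simp [hq]
        simp only [List.map_cons, this, Bool.false_eq_true, List.foldl_cons]
        exact ih _ hm' hnd.2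

-- scattering the counter of l into h = incrementing once per element of l
lemma scatter_counter :
    ∀ (l : List Int) (h : List Int),
      ((PySem.Dict.counter l).items).foldl (fun h p => pyIncrBy h p.1 p.2) h
        = l.foldl (fun h s => pyIncr h s) h := by
  intro l
  induction l using List.reverseRecOn with
  | nil => intro h; rfl
  | append_singleton l s ih =>
      intro h
      rw [PySem.Dict.counter_append_singleton]
      unfold PySem.Dict.modify
      rw [PySem.Dict.items_insert, List.foldl_append]
      by_cases hc : (PySem.Dict.counter l).contains s = true
      · have hkeys : s ∈ ((PySem.Dict.counter l).items).map (·.1) :=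
          (PySem.Dict.contains_iff_mem_keys _ _).mp hc
        have hnd : (((PySem.Dict.counter l).items).map (·.1)).Nodup :=
          PySem.Dict.nodup_keys_counter l
        have hval : ∀ p ∈ (PySem.Dict.counter l).items, (p.1 == s) = true →
            (s, (PySem.Dict.counter l).getD s 0 + 1) = (s, p.2 + 1) := by
          intro p hp hps
          have hps' : p.1 = s := by simpa using hps
          have hval' : (PySem.Dict.counter l).getD p.1 0 = p.2 :=
            PySem.Dict.getD_of_mem_items _ (k := p.1) (v := p.2) (by simpa using hp) hnd 0
          rw [hps'] at hval'; rw [hval']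
        have hmap : ((PySem.Dict.counter l).items).map
              (fun p => if (p.1 == s) = true then (s, (PySem.Dict.counter l).getD s 0 + 1) else p)
            = ((PySem.Dict.counter l).items).map (fun p => if p.1 == s then (s, p.2 + 1) else p) := by
          apply List.map_congr_left
          intro p hp
          by_cases hps : (p.1 == s) = true
          · simp only [hps, if_pos]; exact hval p hp hps
          · simp [hps]
        simp only [hc, if_pos]
        rw [hmap, bump_fold s _ h hkeys hnd, ih]
        simp
      · have h0 : (PySem.Dict.counter l).getD s 0 = 0 :=
          PySem.Dict.getD_of_not_contains _ 0 (by simpa using hc)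
        simp only [hc, Bool.false_eq_true, if_false, List.foldl_append, List.foldl_cons, List.foldl_nil, h0, zero_add]
        rw [ih]
        unfold pyIncr pyIncrBy
        rfl

-- A's inner loop over one row = (the mapped gray row, the histogram fold over that gray row)
lemma inner_eq (row : List (Int × Int × Int)) :
    ∀ (acc : List (Int × Int × Int)) (h : List Int),
      row.foldl
        (fun (st2 : List (Int × Int × Int) × List Int) p =>
          let s := PySem.Int.floordiv (p.1 + p.2.1 + p.2.2) 3
          (st2.1 ++ [(s, s, s)], pyIncr st2.2 s))
        (acc, h)
      = (acc ++ grayRowB row, (grayRowB row).foldl (fun h p => pyIncr h p.1) h) := by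
  induction row with
  | nil => intro acc h; simp [grayRowB]
  | cons p t ih =>
      intro acc h
      simp only [List.foldl_cons, grayRowB, List.map_cons, List.foldl_cons]
      rw [ih]
      simp [grayRowB]

-- A's outer loop = (accumulated mapped rows, histogram fold over the mapped rows)
lemma outer_eq (rows : List (List (Int × Int × Int))) :
    ∀ (acc : List (List (Int × Int × Int))) (h : List Int),
      rows.foldl
        (fun (st : List (List (Int × Int × Int)) × List Int) row =>
          let pr := row.foldl
            (fun (st2 : List (Int × Int × Int) × List Int) p =>
              let s := PySem.Int.floordiv (p.1 + p.2.1 + p.2.2) 3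
              (st2.1 ++ [(s, s, s)], pyIncr st2.2 s))
            (([] : List (Int × Int × Int)), st.2)
          (st.1 ++ [pr.1], pr.2))
        (acc, h)
      = (acc ++ rows.map grayRowB,
         (rows.map grayRowB).foldl (fun h row => row.foldl (fun h p => pyIncr h p.1) h) h) := by
  induction rows with
  | nil => intro acc h; simp
  | cons r t ih =>
      intro acc h
      simp only [List.foldl_cons, List.map_cons]
      rw [inner_eq r [] h]
      rw [ih]
      simp

-- the nested histogram fold over rows = the flat fold over the flattened gray values
lemma nested_flat (rows : List (List (Int × Int × Int))) :
    ∀ (h : List Int),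
      rows.foldl (fun h row => row.foldl (fun h p => pyIncr h p.1) h) h
        = (rows.flatMap (fun row => row.map (·.1))).foldl (fun h s => pyIncr h s) h := by
  induction rows with
  | nil => intro h; rfl
  | cons r t ih =>
      intro h
      simp only [List.foldl_cons, List.flatMap_cons, List.foldl_append, ih, List.foldl_map]

-- ===== VERDICT =====
theorem compute_grayscale_rows_and_hist_spec : Claim_equal_compute_grayscale_rows_and_hist := by
  intro rgb_rows _ _
  unfold Spec_compute_grayscale_rows_and_hist compute_grayscale_rows_and_hist compute_grayscale_rows_and_hist_alt
  rw [outer_eq]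
  simp only [List.nil_append]
  rw [PySem.Dict.foldl_insert_getD_add_one_eq_counter, scatter_counter, nested_flat]
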